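-- pv_equiv track=rewrite | github.com/NotLuffy/gcide-database-manager | analysis/two_piece_pattern_analyzer.py | extract_operations_present
-- ===== SOURCE A (Python) =====
-- from typing import Dict, List, Tuple, Optional
--
-- def extract_operations_present(gcode_content: str) -> List[str]:
--     """Extract which operations are present in the G-code"""
--     operations = set()
--     lines = gcode_content.split('\n')
--
--     for line in lines:
--         line_upper = line.upper().strip()
--
--         if '(DRILL' in line_upper or '( DRILL' in line_upper:
--             operations.add('DRILL')
--         if '(BORE' in line_upper or '( BORE' in line_upper:
--             operations.add('BORE')
--         if '(FACE' in line_upper or '( FACE' in line_upper: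
--             operations.add('FACE')
--         if '(TURN' in line_upper or '( TURN' in line_upper:
--             operations.add('TURN')
--         if '(THREAD' in line_upper or '( THREAD' in line_upper:
--             operations.add('THREAD')
--         if '(CHAMFER' in line_upper or '( CHAMFER' in line_upper:
--             operations.add('CHAMFER')
--         if 'COUNTERBORE' in line_upper or 'CBORE' in line_upper:
--             operations.add('COUNTERBORE')
--         if 'GROOVE' in line_upper:
--             operations.add('GROOVE')
--
--     return list(operations)
-- ===== SOURCE B (Python) =====
-- MARKERS = {
--     'DRILL': ['(DRILL', '( DRILL'],
--     'BORE': ['(BORE', '( BORE'],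
--     'FACE': ['(FACE', '( FACE'],
--     'TURN': ['(TURN', '( TURN'],
--     'THREAD': ['(THREAD', '( THREAD'],
--     'CHAMFER': ['(CHAMFER', '( CHAMFER'],
--     'COUNTERBORE': ['COUNTERBORE', 'CBORE'],
--     'GROOVE': ['GROOVE'],
-- }
--
--
-- def extract_operations_present(gcode_content: str) -> list:
--     """Extract which operations are present in the G-code."""
--     text = gcode_content.upper()
--     return sorted(op for op, markers in MARKERS.items()
--                   if any(m in text for m in markers))
-- ===== Notes on version B (the rewrite author's own statement) =====
-- stated objective: simpler
-- what changed: B uppercases the whole text once and tests each operation's marker substrings against the full text via a marker table, removing A's line split and per-line upper/strip entirely (the loop is inverted: operations over the text instead of lines over operations); the result set is returned sorted, since A's list(set) order is unspecified and outputs are compared as sets.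
import Mathlib
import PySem

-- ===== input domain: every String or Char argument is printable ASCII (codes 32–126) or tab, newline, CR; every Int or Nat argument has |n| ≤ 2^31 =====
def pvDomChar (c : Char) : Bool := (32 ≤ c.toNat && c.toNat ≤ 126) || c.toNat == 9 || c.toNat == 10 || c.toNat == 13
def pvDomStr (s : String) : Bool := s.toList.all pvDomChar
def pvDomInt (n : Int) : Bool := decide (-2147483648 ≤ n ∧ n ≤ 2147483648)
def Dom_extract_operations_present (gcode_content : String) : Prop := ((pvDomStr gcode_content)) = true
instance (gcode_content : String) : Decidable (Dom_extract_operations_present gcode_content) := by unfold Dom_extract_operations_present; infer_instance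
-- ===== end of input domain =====

-- ===== PORT A =====
-- B replaces A's per-line upper/strip scan by one whole-text uppercase pass over a marker table (simpler decomposition);
-- both ports render Python's list(set)/sorted result in sorted order: CPython's list(set) iteration order is hash-dependent
-- and unspecified, and outputs of this function are compared as sets.
-- one body of A's per-line loop: line_upper = line.upper().strip(); the eight if/add statements, in order
def pvStep (s : PySem.Set String) (line : List Char) : PySem.Set String :=
  let lu := PySem.Chars.strip (PySem.Chars.upper line)
  let s := if PySem.Chars.isIn "(DRILL".toList lu || PySem.Chars.isIn "( DRILL".toList lu then PySem.Set.add s "DRILL" else s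
  let s := if PySem.Chars.isIn "(BORE".toList lu || PySem.Chars.isIn "( BORE".toList lu then PySem.Set.add s "BORE" else s
  let s := if PySem.Chars.isIn "(FACE".toList lu || PySem.Chars.isIn "( FACE".toList lu then PySem.Set.add s "FACE" else s
  let s := if PySem.Chars.isIn "(TURN".toList lu || PySem.Chars.isIn "( TURN".toList lu then PySem.Set.add s "TURN" else s
  let s := if PySem.Chars.isIn "(THREAD".toList lu || PySem.Chars.isIn "( THREAD".toList lu then PySem.Set.add s "THREAD" else s
  let s := if PySem.Chars.isIn "(CHAMFER".toList lu || PySem.Chars.isIn "( CHAMFER".toList lu then PySem.Set.add s "CHAMFER" else s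
  let s := if PySem.Chars.isIn "COUNTERBORE".toList lu || PySem.Chars.isIn "CBORE".toList lu then PySem.Set.add s "COUNTERBORE" else s
  let s := if PySem.Chars.isIn "GROOVE".toList lu then PySem.Set.add s "GROOVE" else s
  s

def extract_operations_present (gcode_content : String) : List String :=
  -- lines = gcode_content.split('\n')  (sep is nonempty, so split? is `some`; Chars.splitOn is that split)
  let lines := PySem.Chars.splitOn gcode_content.toList ['\n']
  -- for line in lines: … operations.add(…)
  let operations := lines.foldl pvStep PySem.Set.empty
  -- return list(operations): CPython's list(set) order is hash-dependent/unspecified (PySem: a Set's order is not exact);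
  -- rendered canonically in sorted order, matching B
  PySem.List.sorted operations (fun x => x) false

-- ===== PORT B =====
-- MARKERS, in insertion order
def pvMarkers : List (String × List String) :=
  [("DRILL", ["(DRILL", "( DRILL"]),
   ("BORE", ["(BORE", "( BORE"]),
   ("FACE", ["(FACE", "( FACE"]),
   ("TURN", ["(TURN", "( TURN"]),
   ("THREAD", ["(THREAD", "( THREAD"]),
   ("CHAMFER", ["(CHAMFER", "( CHAMFER"]),
   ("COUNTERBORE", ["COUNTERBORE", "CBORE"]),
   ("GROOVE", ["GROOVE"])]

def extract_operations_present_alt (gcode_content : String) : List String :=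
  -- text = gcode_content.upper()
  let text := PySem.Chars.upper gcode_content.toList
  -- sorted(op for op, markers in MARKERS.items() if any(m in text for m in markers))
  PySem.List.sorted
    ((pvMarkers.filter (fun p => p.2.any (fun m => PySem.Chars.isIn m.toList text))).map (fun p => p.1))
    (fun x => x) false

-- ===== PRECONDITION & SPEC =====
def Spec_extract_operations_present (gcode_content : String) (out : List String) : Prop := out = extract_operations_present_alt gcode_content
instance (gcode_content : String) (out : List String) : Decidable (Spec_extract_operations_present gcode_content out) := by unfold Spec_extract_operations_present; infer_instance

-- ===== CLAIM (what is proved, stated in full; the proofs are below) =====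
def Claim_equal_extract_operations_present : Prop := ∀ (gcode_content : String), Dom_extract_operations_present gcode_content → Spec_extract_operations_present gcode_content (extract_operations_present gcode_content)

-- ===== LEMMAS AND PROOFS =====

-- reference splitter: Python's s.split('\n') as plain structural recursion
def pvSplit : List Char → List (List Char)
  | [] => [[]]
  | c :: r =>
    if c = '\n' then [] :: pvSplit r
    else
      match pvSplit r with
      | [] => [[c]]
      | h :: t => (c :: h) :: t

lemma pvSplit_ne_nil (l : List Char) : pvSplit l ≠ [] := by
  cases l with
  | nil => simp [pvSplit]
  | cons c r =>
    simp only [pvSplit]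
    split
    · simp
    · split <;> simp

-- Chars.splitOn.go computes pvSplit
lemma pvSplit_go (fuel : Nat) (l cur : List Char) (acc : List (List Char))
    (hf : l.length < fuel) :
    PySem.Chars.splitOn.go ['\n'] fuel l cur acc =
      acc.reverse ++
        (match pvSplit l with
         | [] => [cur.reverse]
         | h :: t => (cur.reverse ++ h) :: t) := by
  induction fuel generalizing l cur acc with
  | zero => omega
  | succ fuel ih =>
    cases l with
    | nil =>
      simp [PySem.Chars.splitOn.go, pvSplit]
    | cons c r =>
      by_cases hc : c = '\n'
      · subst hc
        have hpre : List.isPrefixOf ['\n'] ('\n' :: r) = true := by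
          simp [List.isPrefixOf]
        rw [show PySem.Chars.splitOn.go ['\n'] (fuel + 1) ('\n' :: r) cur acc =
              PySem.Chars.splitOn.go ['\n'] fuel (List.drop (['\n'] : List Char).length ('\n' :: r)) [] (cur.reverse :: acc) from by
          rw [PySem.Chars.splitOn.go]; simp [hpre]]
        simp only [List.length_cons, List.length_nil, List.drop_succ_cons, List.drop_zero]
        rw [ih r [] (cur.reverse :: acc) (by simp at hf; omega)]
        simp only [pvSplit]
        cases hs : pvSplit r with
        | nil => exact absurd hs (pvSplit_ne_nil r)
        | cons h t => simp
      · have hpre : List.isPrefixOf ['\n'] (c :: r) = false := by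
          simp [List.isPrefixOf]
          exact fun h => absurd h.symm hc
        rw [show PySem.Chars.splitOn.go ['\n'] (fuel + 1) (c :: r) cur acc =
              PySem.Chars.splitOn.go ['\n'] fuel r (c :: cur) acc from by
          rw [PySem.Chars.splitOn.go]; simp [hpre]]
        rw [ih r (c :: cur) acc (by simp at hf; omega)]
        simp only [pvSplit, if_neg hc]
        cases hs : pvSplit r with
        | nil => exact absurd hs (pvSplit_ne_nil r)
        | cons h t => simp

lemma splitOn_eq_pvSplit (l : List Char) :
    PySem.Chars.splitOn l ['\n'] = pvSplit l := by
  unfold PySem.Chars.splitOn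
  rw [pvSplit_go (l.length + 1) l [] [] (by omega)]
  cases hs : pvSplit l with
  | nil => exact absurd hs (pvSplit_ne_nil l)
  | cons h t => simp

-- every piece is an infix of the split string; the head piece is a prefix
lemma pvSplit_spec (l : List Char) :
    ∃ h t, pvSplit l = h :: t ∧ h <+: l ∧ (∀ p ∈ t, p <:+: l) := by
  induction l with
  | nil => exact ⟨[], [], rfl, List.nil_prefix, by simp⟩
  | cons c r ih =>
    obtain ⟨h, t, he, hp, ht⟩ := ih
    by_cases hc : c = '\n'
    · subst hc
      refine ⟨[], h :: t, by simp [pvSplit, he], List.nil_prefix, ?_⟩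
      intro p hpmem
      rcases List.mem_cons.mp hpmem with rfl | hpt
      · exact (hp.isInfix).trans (List.infix_cons (List.infix_refl r))
      · exact (ht p hpt).trans (List.infix_cons (List.infix_refl r))
    · refine ⟨c :: h, t, by rw [pvSplit, if_neg hc, he], List.cons_prefix_cons.mpr ⟨rfl, hp⟩, ?_⟩
      intro p hpt
      exact (ht p hpt).trans (List.infix_cons (List.infix_refl r))

lemma mem_pvSplit_infix {p l : List Char} (hp : p ∈ pvSplit l) : p <:+: l := by
  obtain ⟨h, t, he, hpre, ht⟩ := pvSplit_spec l
  rw [he] at hp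
  rcases List.mem_cons.mp hp with rfl | hpt
  · exact hpre.isInfix
  · exact ht p hpt

-- a '\n'-free prefix lands in the head piece
lemma pvPrefix_head {m l h : List Char} {t : List (List Char)}
    (hm : m <+: l) (hnl : '\n' ∉ m) (he : pvSplit l = h :: t) : m <+: h := by
  induction l generalizing m h t with
  | nil =>
    have : m = [] := List.prefix_nil.mp hm
    subst this; exact List.nil_prefix
  | cons c r ih =>
    cases m with
    | nil => exact List.nil_prefix
    | cons a m' =>
      obtain ⟨rfl, hm'⟩ := List.cons_prefix_cons.mp hm
      by_cases hc : a = '\n'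
      · exact absurd (hc ▸ List.mem_cons_self) hnl
      · rw [pvSplit, if_neg hc] at he
        cases hs : pvSplit r with
        | nil => exact absurd hs (pvSplit_ne_nil r)
        | cons h' t' =>
          rw [hs] at he
          obtain ⟨rfl, rfl⟩ := List.cons.injEq .. ▸ he
          exact List.cons_prefix_cons.mpr
            ⟨rfl, ih hm' (fun hx => hnl (List.mem_cons_of_mem a hx)) hs⟩

-- a nonempty '\n'-free infix lands in some piece
lemma pvInfix_piece {m l : List Char} (hne : m ≠ []) (hnl : '\n' ∉ m)
    (hm : m <:+: l) : ∃ p ∈ pvSplit l, m <:+: p := by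
  induction l with
  | nil =>
    exact absurd (List.infix_nil.mp hm) hne
  | cons c r ih =>
    rcases List.infix_cons_iff.mp hm with hpre | hinf
    · obtain ⟨h, t, he, _, _⟩ := pvSplit_spec (c :: r)
      exact ⟨h, he ▸ List.mem_cons_self, (pvPrefix_head hpre hnl he).isInfix⟩
    · obtain ⟨p, hpmem, hpin⟩ := ih hinf
      by_cases hc : c = '\n'
      · subst hc
        refine ⟨p, ?_, hpin⟩
        rw [show pvSplit ('\n' :: r) = [] :: pvSplit r from by simp [pvSplit]]
        exact List.mem_cons_of_mem _ hpmem
      · cases hs : pvSplit r with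
        | nil => exact absurd hs (pvSplit_ne_nil r)
        | cons h t =>
          rw [hs] at hpmem
          rcases List.mem_cons.mp hpmem with rfl | hpt
          · refine ⟨c :: p, ?_, hpin.trans (List.infix_cons (List.infix_refl p))⟩
            rw [pvSplit, if_neg hc, hs]
            exact List.mem_cons_self
          · refine ⟨p, ?_, hpin⟩
            rw [pvSplit, if_neg hc, hs]
            exact List.mem_cons_of_mem _ hpt

-- uppercasing commutes with splitting on '\n'
lemma pvUpperChar_nl : PySem.Chars.upperChar '\n' = '\n' := by decide

lemma pvUpperChar_eq_nl {c : Char} (h : PySem.Chars.upperChar c = '\n') : c = '\n' := by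
  unfold PySem.Chars.upperChar PySem.Chars.islower at h
  split at h
  · next hl =>
    exfalso
    simp only [Bool.and_eq_true, decide_eq_true_eq] at hl
    obtain ⟨h1, h2⟩ := hl
    have hge : ('a' : Char).toNat ≤ c.toNat := Fin.mk_le_mk.mp h1
    have hle : c.toNat ≤ ('z' : Char).toNat := Fin.mk_le_mk.mp h2
    have ha : ('a' : Char).toNat = 97 := by decide
    have hz : ('z' : Char).toNat = 122 := by decide
    have hv : (Char.ofNat (c.toNat - 32)).toNat = c.toNat - 32 := by
      rw [Char.toNat_ofNat, if_pos]
      left; omega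
    have h3 : (Char.ofNat (c.toNat - 32)).toNat = ('\n' : Char).toNat := by rw [h]
    have h4 : ('\n' : Char).toNat = 10 := by decide
    omega
  · exact h

lemma pvSplit_map_upper (l : List Char) :
    pvSplit (List.map PySem.Chars.upperChar l) = (pvSplit l).map (List.map PySem.Chars.upperChar) := by
  induction l with
  | nil => simp [pvSplit]
  | cons c r ih =>
    by_cases hc : c = '\n'
    · subst hc
      simp only [List.map_cons, pvUpperChar_nl]
      rw [show ∀ x, pvSplit ('\n' :: x) = [] :: pvSplit x from fun x => by simp [pvSplit]]
      rw [show ∀ x, pvSplit ('\n' :: x) = [] :: pvSplit x from fun x => by simp [pvSplit]]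
      simp [ih]
    · have hc' : PySem.Chars.upperChar c ≠ '\n' := fun h => hc (pvUpperChar_eq_nl h)
      simp only [List.map_cons]
      rw [pvSplit, if_neg hc', pvSplit, if_neg hc, ih]
      cases hs : pvSplit r with
      | nil => exact absurd hs (pvSplit_ne_nil r)
      | cons h t => simp

-- a nonempty infix whose first char fails p survives dropWhile p
lemma pvInfix_dropWhile (p : Char → Bool) {m q : List Char} (hne : m ≠ [])
    (hh : p m.headI = false) (hm : m <:+: q) : m <:+: List.dropWhile p q := by
  obtain ⟨s, t, rfl⟩ := hm
  rw [List.append_assoc, List.dropWhile_append]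
  split
  · cases m with
    | nil => exact absurd rfl hne
    | cons a m' =>
      rw [List.cons_append, List.dropWhile_cons, if_neg (by simpa [List.headI] using hh)]
      exact ⟨[], t, by simp⟩
  · exact ⟨List.dropWhile p s, t, by simp⟩

lemma pvRstrip_infix (x : List Char) : PySem.Chars.rstrip x <:+: x := by
  unfold PySem.Chars.rstrip
  exact List.reverse_infix.mp
    (by simpa using (List.dropWhile_suffix (l := x.reverse) PySem.Chars.isspace).isInfix)

lemma pvStrip_infix (q : List Char) : PySem.Chars.strip q <:+: q := by
  unfold PySem.Chars.strip PySem.Chars.lstrip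
  exact (pvRstrip_infix _).trans (List.dropWhile_suffix _).isInfix

-- a nonempty infix with non-space end chars survives strip
lemma pvInfix_strip {m q : List Char} (hne : m ≠ [])
    (hh : PySem.Chars.isspace m.headI = false)
    (hl : PySem.Chars.isspace m.reverse.headI = false)
    (hm : m <:+: q) : m <:+: PySem.Chars.strip q := by
  unfold PySem.Chars.strip PySem.Chars.rstrip PySem.Chars.lstrip
  have h1 : m <:+: List.dropWhile PySem.Chars.isspace q := pvInfix_dropWhile _ hne hh hm
  have hne' : m.reverse ≠ [] := by simpa using hne
  have h2 : m.reverse <:+: (List.dropWhile PySem.Chars.isspace q).reverse :=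
    List.reverse_infix.mpr h1
  have h3 : m.reverse <:+:
      List.dropWhile PySem.Chars.isspace (List.dropWhile PySem.Chars.isspace q).reverse :=
    pvInfix_dropWhile _ hne' hl h2
  exact List.reverse_infix.mp (by simpa using h3)

-- THE BRIDGE: a marker (nonempty, '\n'-free, non-space end chars) occurs in some
-- stripped uppercased line iff it occurs in the uppercased whole text
lemma pvMarker_bridge (m : List Char) (hne : m ≠ []) (hnl : '\n' ∉ m)
    (hh : PySem.Chars.isspace m.headI = false)
    (hl : PySem.Chars.isspace m.reverse.headI = false)
    (cs : List Char) :
    (∃ p ∈ pvSplit cs, m <:+: PySem.Chars.strip (PySem.Chars.upper p)) ↔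
      m <:+: PySem.Chars.upper cs := by
  constructor
  · rintro ⟨p, hpmem, hm⟩
    have h1 : m <:+: PySem.Chars.upper p := hm.trans (pvStrip_infix _)
    have h2 : p <:+: cs := mem_pvSplit_infix hpmem
    exact h1.trans (List.IsInfix.map _ h2)
  · intro hm
    unfold PySem.Chars.upper at hm ⊢
    obtain ⟨q, hqmem, hqin⟩ := pvInfix_piece hne hnl hm
    rw [pvSplit_map_upper] at hqmem
    obtain ⟨p, hpmem, rfl⟩ := List.mem_map.mp hqmem
    exact ⟨p, hpmem, pvInfix_strip hne hh hl hqin⟩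

-- each marker is nonempty, '\n'-free, with non-space end chars
lemma pvMarkers_wf : ∀ p ∈ pvMarkers, ∀ m ∈ p.2,
    m.toList ≠ [] ∧ ('\n' : Char) ∉ m.toList ∧
    PySem.Chars.isspace m.toList.headI = false ∧
    PySem.Chars.isspace m.toList.reverse.headI = false := by decide

-- per operation: "some line's stripped uppercase contains a marker" is
-- "the uppercased text contains a marker"
lemma pvLine_iff_text (p : String × List String) (hp : p ∈ pvMarkers) (cs : List Char) :
    (∃ line ∈ pvSplit cs, p.2.any (fun m => PySem.Chars.isIn m.toList
        (PySem.Chars.strip (PySem.Chars.upper line))) = true) ↔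
      p.2.any (fun m => PySem.Chars.isIn m.toList (PySem.Chars.upper cs)) = true := by
  simp only [List.any_eq_true, PySem.Chars.isIn_iff_infix]
  constructor
  · rintro ⟨line, hline, m, hm, hin⟩
    obtain ⟨hne, hnl, hh, hl⟩ := pvMarkers_wf p hp m hm
    exact ⟨m, hm, (pvMarker_bridge m.toList hne hnl hh hl cs).mp ⟨line, hline, hin⟩⟩
  · rintro ⟨m, hm, hin⟩
    obtain ⟨hne, hnl, hh, hl⟩ := pvMarkers_wf p hp m hm
    obtain ⟨line, hline, h⟩ := (pvMarker_bridge m.toList hne hnl hh hl cs).mpr hin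
    exact ⟨line, hline, m, hm, h⟩

-- membership in one step of A's loop
lemma pvMem_addIf {s : PySem.Set String} {b : Bool} {v x : String} :
    (x ∈ (if b then PySem.Set.add s v else s)) ↔ x ∈ s ∨ (b = true ∧ x = v) := by
  cases b <;> simp [PySem.Set.mem_add]

set_option maxHeartbeats 1000000 in
lemma pvMem_pvStep (s : PySem.Set String) (line : List Char) (x : String) :
    x ∈ pvStep s line ↔
      x ∈ s ∨ ∃ p ∈ pvMarkers,
        p.2.any (fun m => PySem.Chars.isIn m.toList
          (PySem.Chars.strip (PySem.Chars.upper line))) = true ∧ x = p.1 := by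
  unfold pvStep pvMarkers
  simp only [pvMem_addIf, List.mem_cons, List.not_mem_nil, List.any_cons, List.any_nil,
    Bool.or_false, or_assoc, exists_eq_or_imp, exists_eq_left, or_false]

lemma pvMem_foldl (lines : List (List Char)) (s : PySem.Set String) (x : String) :
    x ∈ lines.foldl pvStep s ↔
      x ∈ s ∨ ∃ line ∈ lines, ∃ p ∈ pvMarkers,
        p.2.any (fun m => PySem.Chars.isIn m.toList
          (PySem.Chars.strip (PySem.Chars.upper line))) = true ∧ x = p.1 := by
  induction lines generalizing s with
  | nil => simp
  | cons l ls ih =>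
    rw [List.foldl_cons, ih, pvMem_pvStep]
    constructor
    · rintro ((h | h) | ⟨line, h1, h2⟩)
      · exact Or.inl h
      · exact Or.inr ⟨l, List.mem_cons_self, h⟩
      · exact Or.inr ⟨line, List.mem_cons_of_mem l h1, h2⟩
    · rintro (h | ⟨line, h1, h2⟩)
      · exact Or.inl (Or.inl h)
      · rcases List.mem_cons.mp h1 with rfl | h1
        · exact Or.inl (Or.inr h2)
        · exact Or.inr ⟨line, h1, h2⟩

-- membership in A's final set, in whole-text terms
lemma pvMem_A (cs : List Char) (a : String) :
    a ∈ (pvSplit cs).foldl pvStep PySem.Set.empty ↔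
      ∃ p ∈ pvMarkers,
        p.2.any (fun m => PySem.Chars.isIn m.toList (PySem.Chars.upper cs)) = true ∧ a = p.1 := by
  rw [pvMem_foldl]
  simp only [PySem.Set.empty, List.not_mem_nil, false_or]
  constructor
  · rintro ⟨line, hline, p, hp, hhit, rfl⟩
    exact ⟨p, hp, (pvLine_iff_text p hp cs).mp ⟨line, hline, hhit⟩, rfl⟩
  · rintro ⟨p, hp, hhit, rfl⟩
    obtain ⟨line, hline, hl⟩ := (pvLine_iff_text p hp cs).mpr hhit
    exact ⟨line, hline, p, hp, hl, rfl⟩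

-- nodup of A's accumulated set
lemma pvNodup_addIf {s : PySem.Set String} (b : Bool) (v : String) (h : s.Nodup) :
    (if b then PySem.Set.add s v else s).Nodup := by
  cases b
  · simpa using h
  · simpa using PySem.Set.nodup_add s v h

lemma pvNodup_pvStep {s : PySem.Set String} (h : s.Nodup) (line : List Char) :
    (pvStep s line).Nodup := by
  unfold pvStep
  exact pvNodup_addIf _ _ (pvNodup_addIf _ _ (pvNodup_addIf _ _ (pvNodup_addIf _ _
    (pvNodup_addIf _ _ (pvNodup_addIf _ _ (pvNodup_addIf _ _ (pvNodup_addIf _ _ h)))))))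

lemma pvNodup_foldl (lines : List (List Char)) {s : PySem.Set String} (h : s.Nodup) :
    (lines.foldl pvStep s).Nodup := by
  induction lines generalizing s with
  | nil => exact h
  | cons l ls ih => exact ih (pvNodup_pvStep h l)

-- the common sorted value: the present operations, in alphabetical order
def pvAlpha : List String := ["BORE", "CHAMFER", "COUNTERBORE", "DRILL", "FACE", "GROOVE", "THREAD", "TURN"]

def pvYs (cs : List Char) : List String :=
  pvAlpha.filter (fun a => pvMarkers.any (fun p =>
    a == p.1 && p.2.any (fun m => PySem.Chars.isIn m.toList (PySem.Chars.upper cs))))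

lemma pvAlpha_pairwise : pvAlpha.Pairwise (fun a b : String => a < b) := by
  have h : (pvAlpha.map String.toList).Pairwise (fun a b => a < b) := by decide
  rw [List.pairwise_map] at h
  exact h.imp (fun hab => String.lt_iff_toList_lt.mpr hab)

lemma pvYs_pairwise (cs : List Char) : (pvYs cs).Pairwise (fun a b : String => a < b) :=
  List.Pairwise.filter _ pvAlpha_pairwise

lemma pvYs_nodup (cs : List Char) : (pvYs cs).Nodup :=
  (pvYs_pairwise cs).imp (fun hab => ne_of_lt hab)

lemma pvAlpha_mem : ∀ p ∈ pvMarkers, p.1 ∈ pvAlpha := by decide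

lemma pvMem_ys (cs : List Char) (a : String) :
    a ∈ pvYs cs ↔ ∃ p ∈ pvMarkers,
      p.2.any (fun m => PySem.Chars.isIn m.toList (PySem.Chars.upper cs)) = true ∧ a = p.1 := by
  unfold pvYs
  rw [List.mem_filter]
  simp only [List.any_eq_true (l := pvMarkers), Bool.and_eq_true, beq_iff_eq]
  constructor
  · rintro ⟨_, p, hp, rfl, hhit⟩
    exact ⟨p, hp, hhit, rfl⟩
  · rintro ⟨p, hp, hhit, rfl⟩
    exact ⟨pvAlpha_mem p hp, p, hp, rfl, hhit⟩

-- membership and nodup of B's filtered list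
lemma pvMem_B (cs : List Char) (a : String) :
    a ∈ (pvMarkers.filter (fun p => p.2.any (fun m =>
        PySem.Chars.isIn m.toList (PySem.Chars.upper cs)))).map (fun p => p.1) ↔
      ∃ p ∈ pvMarkers,
        p.2.any (fun m => PySem.Chars.isIn m.toList (PySem.Chars.upper cs)) = true ∧ a = p.1 := by
  simp only [List.mem_map, List.mem_filter]
  constructor
  · rintro ⟨p, ⟨hp, hq⟩, rfl⟩
    exact ⟨p, hp, hq, rfl⟩
  · rintro ⟨p, hp, hq, rfl⟩
    exact ⟨p, ⟨hp, hq⟩, rfl⟩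

lemma pvNodup_B (cs : List Char) :
    ((pvMarkers.filter (fun p => p.2.any (fun m =>
        PySem.Chars.isIn m.toList (PySem.Chars.upper cs)))).map (fun p => p.1)).Nodup := by
  have hsub : List.Sublist
      ((pvMarkers.filter (fun p => p.2.any (fun m =>
        PySem.Chars.isIn m.toList (PySem.Chars.upper cs)))).map (fun p => p.1))
      (pvMarkers.map (fun p => p.1)) :=
    (List.filter_sublist (l := pvMarkers)).map _
  have hnd : (pvMarkers.map (fun p => (p : String × List String).1)).Nodup := by decide
  exact hnd.sublist hsub

-- the two ports compute the same sorted list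
theorem pv_main (gcode_content : String) :
    extract_operations_present gcode_content = extract_operations_present_alt gcode_content := by
  unfold extract_operations_present extract_operations_present_alt
  rw [splitOn_eq_pvSplit]
  have hA : PySem.List.sorted ((pvSplit gcode_content.toList).foldl pvStep PySem.Set.empty)
      (fun x => x) false = pvYs gcode_content.toList := by
    apply PySem.List.sorted_eq_of_perm_of_pairwise_lt
    · rw [List.perm_ext_iff_of_nodup (pvYs_nodup _)
        (pvNodup_foldl _ (by simp [PySem.Set.empty]))]
      intro a
      rw [pvMem_ys, pvMem_A]
    · exact pvYs_pairwise _
  have hB : PySem.List.sorted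
      ((pvMarkers.filter (fun p => p.2.any (fun m =>
        PySem.Chars.isIn m.toList (PySem.Chars.upper gcode_content.toList)))).map (fun p => p.1))
      (fun x => x) false = pvYs gcode_content.toList := by
    apply PySem.List.sorted_eq_of_perm_of_pairwise_lt
    · rw [List.perm_ext_iff_of_nodup (pvYs_nodup _) (pvNodup_B _)]
      intro a
      rw [pvMem_ys, pvMem_B]
    · exact pvYs_pairwise _
  rw [hA, hB]

-- ===== VERDICT (by name: the statement is the Claim_ definition above) =====
theorem extract_operations_present_spec : Claim_equal_extract_operations_present := by
  intro gcode_content _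
  unfold Spec_extract_operations_present
  exact pv_main gcode_content
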